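-- pv_equiv track=rewrite | github.com/lcp5674/patent-exam-system | backend/app/ai/patent_dna/fingerprint.py | _calc_tree_depth
-- ===== SOURCE A (Python) =====
-- def _calc_tree_depth(deps: dict, roots: list) -> int:
--     if not deps:
--         return 1
--     max_depth = 1
--     for node, parent in deps.items():
--         depth = 1
--         current = node
--         visited = set()
--         while current in deps and current not in visited:
--             visited.add(current)
--             current = deps[current]
--             depth += 1
--         max_depth = max(max_depth, depth)
--     return max_depth
-- ===== SOURCE B (Python) =====
-- def _calc_tree_depth(deps: dict, roots: list) -> int:
--     if not deps:
--         return 1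
--     memo = {}
--     for start in deps:
--         if start in memo:
--             continue
--         path = []
--         pos = {}
--         cur = start
--         while cur in deps and cur not in memo and cur not in pos:
--             pos[cur] = len(path)
--             path.append(cur)
--             cur = deps[cur]
--         if cur in pos:
--             i = pos[cur]
--             c = len(path) - i
--             for node in path[i:]:
--                 memo[node] = c
--             base = c
--             rest = path[:i]
--         else:
--             base = memo.get(cur, 0)
--             rest = path
--         for node in reversed(rest):
--             base += 1
--             memo[node] = base
--     return 1 + max(memo[n] for n in deps)
-- ===== Notes on version B (the rewrite author's own statement) =====
-- stated objective: alternative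
-- what changed: A re-walks the parent chain from scratch for every node; B makes a single memoized pass over the functional graph, assigning each walked path's nodes (cycle part and tail) their chain lengths once, so every node is walked only O(1) times.
import Mathlib
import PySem

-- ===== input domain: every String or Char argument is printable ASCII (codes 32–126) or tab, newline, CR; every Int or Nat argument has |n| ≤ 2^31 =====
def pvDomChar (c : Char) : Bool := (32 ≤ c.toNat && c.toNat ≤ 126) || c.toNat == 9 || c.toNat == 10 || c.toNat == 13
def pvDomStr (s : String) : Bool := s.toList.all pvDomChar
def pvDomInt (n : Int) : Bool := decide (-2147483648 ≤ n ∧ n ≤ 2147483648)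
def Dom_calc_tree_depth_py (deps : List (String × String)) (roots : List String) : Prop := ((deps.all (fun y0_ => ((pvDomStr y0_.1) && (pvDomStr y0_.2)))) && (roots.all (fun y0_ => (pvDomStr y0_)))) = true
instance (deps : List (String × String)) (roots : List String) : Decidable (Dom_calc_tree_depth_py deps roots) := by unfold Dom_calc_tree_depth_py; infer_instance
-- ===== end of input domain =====

-- B replaces A's independent re-walk of the parent chain per node by a single memoized
-- pass over the functional graph with explicit cycle handling; return values are identical.

-- ===== PORT A =====
-- the inner 'while current in deps and current not in visited' loop; fuel d.size+1 is
-- enough because each iteration adds a fresh key of d to visited.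
def pvWalkA (d : PySem.Dict String String) : Nat → String → PySem.Set String → Int → Int
  | 0, _, _, depth => depth
  | n+1, current, visited, depth =>
    if d.contains current && !(visited.contains current) then
      pvWalkA d n (d.getD current "") (visited.add current) (depth + 1)
    else depth

def calc_tree_depth_py (deps : List (String × String)) (roots : List String) : Int :=
  let d := PySem.Dict.ofList deps
  if d.items.isEmpty then 1
  else
    d.items.foldl
      (fun max_depth nd => max max_depth (pvWalkA d (d.size + 1) nd.1 PySem.Set.empty 1))
      1

-- ===== PORT B =====
-- the inner 'while cur in deps and cur not in memo and cur not in pos' loop of Source B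
def pvWalkB (d : PySem.Dict String String) (memo : PySem.Dict String Int) :
    Nat → String → List String → PySem.Dict String Int →
    List String × PySem.Dict String Int × String
  | 0, cur, path, pos => (path, pos, cur)
  | n+1, cur, path, pos =>
    if d.contains cur && !(memo.contains cur) && !(pos.contains cur) then
      pvWalkB d memo n (d.getD cur "") (path ++ [cur]) (pos.insert cur (path.length : Int))
    else (path, pos, cur)

-- one iteration of Source B's 'for start in deps' loop
def pvProcess (d : PySem.Dict String String) (memo : PySem.Dict String Int)
    (start : String) : PySem.Dict String Int :=
  if memo.contains start then memo
  else
    let r := pvWalkB d memo (d.size + 1) start [] PySem.Dict.empty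
    let path := r.1
    let pos := r.2.1
    let cur := r.2.2
    let t :=
      if pos.contains cur then
        let i := pos.getD cur 0
        let c : Int := (path.length : Int) - i
        let memo1 := (PySem.List.slice path (some i) none).foldl
          (fun m node => m.insert node c) memo
        (memo1, c, PySem.List.slice path none (some i))
      else
        (memo, memo.getD cur 0, path)
    (t.2.2.reverse.foldl
      (fun (p : PySem.Dict String Int × Int) node => (p.1.insert node (p.2 + 1), p.2 + 1))
      (t.1, t.2.1)).1

def calc_tree_depth_py_alt (deps : List (String × String)) (roots : List String) : Int :=
  let d := PySem.Dict.ofList deps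
  if d.items.isEmpty then 1
  else
    let memo := d.items.foldl (fun m kv => pvProcess d m kv.1) PySem.Dict.empty
    match d.items.map (fun kv => memo.getD kv.1 0) with
    | [] => 1
    | v :: vs => 1 + vs.foldl max v

-- ===== PRECONDITION & SPEC =====
def Spec_calc_tree_depth_py (deps : List (String × String)) (roots : List String) (out : Int) : Prop := out = calc_tree_depth_py_alt deps roots
instance (deps : List (String × String)) (roots : List String) (out : Int) : Decidable (Spec_calc_tree_depth_py deps roots out) := by unfold Spec_calc_tree_depth_py; infer_instance

-- ===== CLAIM (what is proved, stated in full; the proofs are below) =====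
def Claim_equal_calc_tree_depth_py : Prop := ∀ (deps : List (String × String)) (roots : List String), Dom_calc_tree_depth_py deps roots → Spec_calc_tree_depth_py deps roots (calc_tree_depth_py deps roots)

-- ===== LEMMAS AND PROOFS =====

-- reference walk: the list of nodes A's inner loop marks visited
def pvWlk (d : PySem.Dict String String) : Nat → String → List String → List String
  | 0, _, _ => []
  | n+1, x, vs =>
    match d.get? x with
    | none => []
    | some y => if x ∈ vs then [] else x :: pvWlk d n y (x :: vs)


def pvWlkF (d : PySem.Dict String String) (x : String) : List String :=
  pvWlk d (d.size + 1) x []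

def pvSt (d : PySem.Dict String String) (x : String) : Int :=
  ((pvWlkF d x).length : Int)

theorem pvWlk_succ (d : PySem.Dict String String) (n : Nat) (x : String) (vs : List String) :
    pvWlk d (n + 1) x vs =
      match d.get? x with
      | none => []
      | some y => if x ∈ vs then [] else x :: pvWlk d n y (x :: vs) := rfl

theorem pvWlk_congr (d : PySem.Dict String String) :
    ∀ (n : Nat) (x : String) (vs vs' : List String),
      (∀ z : String, z ∈ vs ↔ z ∈ vs') → pvWlk d n x vs = pvWlk d n x vs' := by
  intro n
  induction n with
  | zero => intro x vs vs' h; rfl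
  | succ n ih =>
    intro x vs vs' h
    simp only [pvWlk]
    cases hg : d.get? x with
    | none => rfl
    | some y =>
      dsimp only
      by_cases hx : x ∈ vs
      · rw [if_pos hx, if_pos ((h x).mp hx)]
      · rw [if_neg hx, if_neg (fun hx' => hx ((h x).mpr hx'))]
        rw [ih y (x :: vs) (x :: vs') (by intro z; simp [h z])]

theorem pvWlk_stop (d : PySem.Dict String String) (n : Nat) (c : String)
    (vs : List String) (h : d.get? c = none ∨ c ∈ vs) : pvWlk d n c vs = [] := by
  cases n with
  | zero => rfl
  | succ n =>
    simp only [pvWlk]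
    cases hg : d.get? c with
    | none => rfl
    | some y =>
      dsimp only
      rcases h with h | h
      · rw [hg] at h; cases h
      · rw [if_pos h]

def pvCap (d : PySem.Dict String String) (vs : List String) : Nat :=
  (d.keys.filter (fun k => decide (k ∉ vs))).length

theorem pvCountP_succ {l : List String} (hn : l.Nodup) {x : String} (hx : x ∈ l)
    {p p' : String → Bool} (hpx : p x = true) (hp'x : p' x = false)
    (hagree : ∀ z, z ≠ x → p z = p' z) : l.countP p = l.countP p' + 1 := by
  induction l with
  | nil => cases hx
  | cons a t ih =>
    rcases List.mem_cons.mp hx with hax | hx'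
    · subst hax
      have hxt : x ∉ t := (List.nodup_cons.mp hn).1
      have : t.countP p = t.countP p' := by
        apply List.countP_congr
        intro z hz
        rw [hagree z (fun h => hxt (h ▸ hz))]
      simp [hpx, hp'x, this]
    · have ha : a ≠ x := by
        rintro rfl; exact (List.nodup_cons.mp hn).1 hx'
      have := ih (List.nodup_cons.mp hn).2 hx'
      simp only [List.countP_cons, hagree a ha, this]
      omega

theorem pvCap_cons (d : PySem.Dict String String) (hk : d.keys.Nodup)
    {x : String} (hx : x ∈ d.keys) {vs : List String} (hvs : x ∉ vs) :
    pvCap d vs = pvCap d (x :: vs) + 1 := by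
  unfold pvCap
  rw [← List.countP_eq_length_filter, ← List.countP_eq_length_filter]
  exact pvCountP_succ hk hx (by simp [hvs]) (by simp)
    (fun z hz => by simp [List.mem_cons, hz])

theorem pvWlk_fuel_succ (d : PySem.Dict String String) (hk : d.keys.Nodup) :
    ∀ (n : Nat) (x : String) (vs : List String),
      pvCap d vs ≤ n → pvWlk d (n + 1) x vs = pvWlk d n x vs := by
  intro n
  induction n with
  | zero =>
    intro x vs hc
    simp only [pvWlk]
    cases hg : d.get? x with
    | none => rfl
    | some y =>
      dsimp only
      by_cases hx : x ∈ vs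
      · rw [if_pos hx]
      · exfalso
        have hxk : x ∈ d.keys := by
          have : d.contains x = true := by
            rw [PySem.Dict.contains_eq_isSome_get?, hg]; rfl
          exact (PySem.Dict.contains_iff_mem_keys d x).mp this
        have := pvCap_cons d hk hxk hx
        omega
  | succ n ih =>
    intro x vs hc
    rw [pvWlk_succ, pvWlk_succ]
    cases hg : d.get? x with
    | none => rfl
    | some y =>
      dsimp only
      by_cases hx : x ∈ vs
      · rw [if_pos hx, if_pos hx]
      · rw [if_neg hx, if_neg hx]
        have hxk : x ∈ d.keys := by
          have : d.contains x = true := by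
            rw [PySem.Dict.contains_eq_isSome_get?, hg]; rfl
          exact (PySem.Dict.contains_iff_mem_keys d x).mp this
        have hcc := pvCap_cons d hk hxk hx
        rw [ih y (x :: vs) (by omega)]

theorem pvWlk_fuel_le (d : PySem.Dict String String) (hk : d.keys.Nodup)
    {n m : Nat} (hc : pvCap d vs ≤ n) (hnm : n ≤ m) (x : String) :
    pvWlk d m x vs = pvWlk d n x vs := by
  obtain ⟨k, rfl⟩ : ∃ k, m = n + k := ⟨m - n, by omega⟩
  clear hnm
  induction k with
  | zero => rfl
  | succ k ih =>
    have : n + (k + 1) = (n + k) + 1 := by omega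
    rw [this, pvWlk_fuel_succ d hk (n + k) x vs (by omega), ih]

theorem pvWalkA_eq (d : PySem.Dict String String) :
    ∀ (n : Nat) (x : String) (vis : PySem.Set String) (depth : Int),
      pvWalkA d n x vis depth = depth + ((pvWlk d n x vis).length : Int) := by
  intro n
  induction n with
  | zero => intro x vis depth; simp [pvWalkA, pvWlk]
  | succ n ih =>
    intro x vis depth
    rw [pvWalkA, pvWlk_succ]
    cases hg : d.get? x with
    | none =>
      have hc : d.contains x = false := by
        rw [PySem.Dict.contains_eq_isSome_get?, hg]; rfl
      simp [hc]
    | some y =>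
      have hc : d.contains x = true := by
        rw [PySem.Dict.contains_eq_isSome_get?, hg]; rfl
      have hgD : d.getD x "" = y := PySem.Dict.getD_of_get?_eq_some d "" hg
      dsimp only
      by_cases hx : x ∈ vis
      · have : vis.contains x = true := by simpa using hx
        simp [hc, this, hx]
      · have hcx : vis.contains x = false := by simpa using hx
        have hcond : (d.contains x && !vis.contains x) = true := by rw [hc, hcx]; rfl
        rw [if_pos hcond, if_neg hx, hgD, ih]
        rw [pvWlk_congr d n y (vis.add x) (x :: vis)
          (by intro z; simp [PySem.Set.mem_add, or_comm])]
        simp only [List.length_cons]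
        push_cast
        ring

def pvChain (d : PySem.Dict String String) : String → List String → String → Prop
  | x, [], c => x = c
  | x, q :: Q, c => q = x ∧ d.get? x = some (Q.headD c) ∧ pvChain d (Q.headD c) Q c

theorem pvChain_mem_keys (d : PySem.Dict String String) :
    ∀ (Q : List String) (x c : String), pvChain d x Q c → ∀ z ∈ Q, z ∈ d.keys := by
  intro Q
  induction Q with
  | nil => intro x c _ z hz; cases hz
  | cons q Q ih =>
    intro x c hch z hz
    obtain ⟨rfl, hg, hch'⟩ := hch
    rcases List.mem_cons.mp hz with rfl | hz'
    · have : d.contains z = true := by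
        rw [PySem.Dict.contains_eq_isSome_get?, hg]; rfl
      exact (PySem.Dict.contains_iff_mem_keys d z).mp this
    · exact ih _ c hch' z hz'

theorem headD_append (A B : List String) (c : String) :
    (A ++ B).headD c = A.headD (B.headD c) := by
  cases A <;> rfl

theorem pvChain_append_right (d : PySem.Dict String String) :
    ∀ (A B : List String) (x c : String),
      pvChain d x (A ++ B) c → pvChain d (B.headD c) B c := by
  intro A
  induction A with
  | nil =>
    intro B x c hch
    cases B with
    | nil => exact hch ▸ rfl
    | cons b B' =>
      obtain ⟨rfl, hg, hch'⟩ := hch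
      exact ⟨rfl, hg, hch'⟩
  | cons a A' ih =>
    intro B x c hch
    obtain ⟨rfl, hg, hch'⟩ := hch
    simp only [List.append_eq] at hch'
    exact ih B _ c hch'

theorem pvChain_append_left (d : PySem.Dict String String) :
    ∀ (A B : List String) (x c : String),
      pvChain d x (A ++ B) c → pvChain d x A (B.headD c) := by
  intro A
  induction A with
  | nil =>
    intro B x c hch
    cases B with
    | nil => exact hch
    | cons b B' => exact hch.1.symm
  | cons a A' ih =>
    intro B x c hch
    obtain ⟨rfl, hg, hch'⟩ := hch
    simp only [List.append_eq] at hg hch'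
    refine ⟨rfl, ?_, ?_⟩
    · rw [hg, headD_append]
    · rw [← headD_append]
      exact ih B _ c hch'

-- MAIN decomposition: the walk traverses a fresh chain Q and continues from c
theorem pvWlk_chain (d : PySem.Dict String String) :
    ∀ (Q : List String) (x c : String) (vs : List String) (n : Nat),
      pvChain d x Q c → Q.Nodup → (∀ q ∈ Q, q ∉ vs) →
      pvWlk d (Q.length + n) x vs = Q ++ pvWlk d n c (Q.reverse ++ vs) := by
  intro Q
  induction Q with
  | nil => intro x c vs n hch _ _; cases hch; simp
  | cons q Q' ih =>
    intro x c vs n hch hnd hdisj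
    obtain ⟨rfl, hg, hch'⟩ := hch
    have hxvs : q ∉ vs := hdisj q (List.mem_cons_self)
    have : (q :: Q').length + n = (Q'.length + n) + 1 := by simp; omega
    rw [this, pvWlk_succ, hg]
    dsimp only
    rw [if_neg hxvs]
    rw [ih (Q'.headD c) c (q :: vs) n hch' (List.nodup_cons.mp hnd).2
      (by
        intro z hz
        simp only [List.mem_cons, not_or]
        exact ⟨fun h => (List.nodup_cons.mp hnd).1 (h ▸ hz), hdisj z (List.mem_cons_of_mem _ hz)⟩)]
    rw [pvWlk_congr d n c (Q'.reverse ++ q :: vs) ((q :: Q').reverse ++ vs)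
      (by intro z; simp; try tauto)]
    simp

-- visited entries disjoint from the walk are irrelevant
theorem pvWlk_vs_append (d : PySem.Dict String String) :
    ∀ (n : Nat) (x : String) (ws vs : List String),
      (∀ z ∈ ws, z ∉ pvWlk d n x vs) → pvWlk d n x (ws ++ vs) = pvWlk d n x vs := by
  intro n
  induction n with
  | zero => intros; rfl
  | succ n ih =>
    intro x ws vs hdisj
    rw [pvWlk_succ, pvWlk_succ]
    cases hg : d.get? x with
    | none => rfl
    | some y =>
      dsimp only
      by_cases hx : x ∈ vs
      · rw [if_pos hx, if_pos (List.mem_append.mpr (Or.inr hx))]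
      · rw [if_neg hx]
        have hxw : x ∉ ws := by
          intro hxw
          exact hdisj x hxw (by rw [pvWlk_succ, hg]; simp [hx])
        rw [if_neg (by simp [hxw, hx])]
        congr 1
        rw [pvWlk_congr d n y (x :: (ws ++ vs)) (ws ++ x :: vs) (by intro z; simp; try tauto)]
        apply ih
        intro z hz hzw
        apply hdisj z hz
        rw [pvWlk_succ, hg]
        simp only [if_neg hx]
        exact List.mem_cons_of_mem _ hzw

theorem pvKeysLen (d : PySem.Dict String String) : d.keys.length = d.size := by
  simp [PySem.Dict.keys, PySem.Dict.size]

theorem pvCap_of_subset (d : PySem.Dict String String) (hk : d.keys.Nodup)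
    {vs : List String} (hnd : vs.Nodup) (hsub : ∀ v ∈ vs, v ∈ d.keys) :
    pvCap d vs + vs.length = d.size := by
  unfold pvCap
  have h1 : (d.keys.filter (fun k => decide (k ∈ vs))).length = vs.length := by
    apply List.Perm.length_eq
    rw [List.perm_ext_iff_of_nodup (List.Nodup.filter _ hk) hnd]
    intro a
    simp only [List.mem_filter, decide_eq_true_eq]
    exact ⟨fun h => h.2, fun h => ⟨hsub a h, h⟩⟩
  have h2 := (List.length_eq_length_filter_add (l := d.keys) (fun k => decide (k ∈ vs))).symm
  have h3 : (d.keys.filter (fun k => !decide (k ∈ vs))) =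
      (d.keys.filter (fun k => decide (k ∉ vs))) := by
    apply List.filter_congr; intro a _; simp
  rw [h3] at h2
  rw [← pvKeysLen d, ← h2, ← h1]
  omega

theorem pvLen_le_size (d : PySem.Dict String String) (hk : d.keys.Nodup)
    {Q : List String} (hnd : Q.Nodup) (hsub : ∀ q ∈ Q, q ∈ d.keys) :
    Q.length ≤ d.size := by
  rw [← pvKeysLen d]
  exact List.Subperm.length_le (List.subperm_of_subset hnd hsub)

theorem pvEval_gen (d : PySem.Dict String String) (hk : d.keys.Nodup)
    {q c : String} {Q2 : List String}
    (hch : pvChain d q (q :: Q2) c) (hnd : (q :: Q2).Nodup) :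
    pvWlk d (d.size + 1) q [] =
      (q :: Q2) ++ pvWlk d (d.size + 1 - (q :: Q2).length) c (q :: Q2).reverse := by
  have hsub := pvChain_mem_keys d (q :: Q2) q c hch
  have hle : (q :: Q2).length ≤ d.size := pvLen_le_size d hk hnd hsub
  have harith : d.size + 1 = (q :: Q2).length + (d.size + 1 - (q :: Q2).length) := by omega
  conv_lhs => rw [harith]
  rw [pvWlk_chain d (q :: Q2) q c [] _ hch hnd (by simp)]
  rw [List.append_nil]

theorem pvEval_cycle_hit (d : PySem.Dict String String) (hk : d.keys.Nodup)
    {q c : String} {Q2 : List String}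
    (hch : pvChain d q (q :: Q2) c) (hnd : (q :: Q2).Nodup) (hc : c ∈ q :: Q2) :
    pvWlk d (d.size + 1) q [] = q :: Q2 := by
  rw [pvEval_gen d hk hch hnd, pvWlk_stop d _ c _ (Or.inr (List.mem_reverse.mpr hc))]
  simp

theorem pvEval_nocycle (d : PySem.Dict String String) (hk : d.keys.Nodup)
    {q c : String} {Q2 : List String}
    (hch : pvChain d q (q :: Q2) c) (hnd : (q :: Q2).Nodup)
    (hW : ∀ z ∈ pvWlk d (d.size + 1) c [], z ∉ q :: Q2) :
    pvWlk d (d.size + 1) q [] = (q :: Q2) ++ pvWlk d (d.size + 1) c [] := by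
  have hsub := pvChain_mem_keys d (q :: Q2) q c hch
  have hle : (q :: Q2).length ≤ d.size := pvLen_le_size d hk hnd hsub
  have hcap : pvCap d (q :: Q2).reverse + (q :: Q2).length = d.size := by
    have := pvCap_of_subset d hk (vs := (q :: Q2).reverse)
      (List.nodup_reverse.mpr hnd)
      (fun v hv => hsub v (List.mem_reverse.mp hv))
    simpa using this
  rw [pvEval_gen d hk hch hnd]
  congr 1
  have hfu := pvWlk_fuel_le d hk (vs := (q :: Q2).reverse)
    (n := d.size + 1 - (q :: Q2).length) (m := d.size + 1) (by omega) (by omega) c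
  rw [← hfu]
  have hV := pvWlk_vs_append d (d.size + 1) c (q :: Q2).reverse []
    (fun z hz hzw => hW z hzw (List.mem_reverse.mp hz))
  simpa using hV

theorem pvEval_cycle_after (d : PySem.Dict String String) (hk : d.keys.Nodup)
    {q c : String} {Q2 Qc1 : List String}
    (hch : pvChain d q (q :: Q2) c) (hch2 : pvChain d c (c :: Qc1) q)
    (hnd : ((q :: Q2) ++ (c :: Qc1)).Nodup) :
    pvWlk d (d.size + 1) q [] = (q :: Q2) ++ (c :: Qc1) := by
  have hnd1 : (q :: Q2).Nodup := (List.nodup_append.mp hnd).1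
  have hnd2 : (c :: Qc1).Nodup := (List.nodup_append.mp hnd).2.1
  have hdisj := (List.nodup_append.mp hnd).2.2
  have hsub1 := pvChain_mem_keys d (q :: Q2) q c hch
  have hsub2 := pvChain_mem_keys d (c :: Qc1) c q hch2
  have hlen : ((q :: Q2) ++ (c :: Qc1)).length ≤ d.size := by
    apply pvLen_le_size d hk hnd
    intro z hz
    rcases List.mem_append.mp hz with h | h
    · exact hsub1 z h
    · exact hsub2 z h
  rw [pvEval_gen d hk hch hnd1]
  congr 1
  set r := d.size + 1 - (q :: Q2).length with hr
  have hr2 : r = (c :: Qc1).length + (r - (c :: Qc1).length) := by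
    simp only [List.length_append] at hlen; omega
  rw [hr2, pvWlk_chain d (c :: Qc1) c q _ _ hch2 hnd2
    (by
      intro z hz hzrev
      exact hdisj z (List.mem_reverse.mp hzrev) z hz rfl)]
  rw [pvWlk_stop d _ q _ (Or.inr (by simp))]
  simp

theorem pvFoldConst_get? (cv : Int) :
    ∀ (l : List String) (m : PySem.Dict String Int) (x : String),
      (l.foldl (fun m node => m.insert node cv) m).get? x =
        if x ∈ l then some cv else m.get? x := by
  intro l
  induction l with
  | nil => intro m x; simp
  | cons a t ih =>
    intro m x
    rw [List.foldl_cons, ih]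
    by_cases hx : x ∈ t
    · simp [hx]
    · rw [if_neg hx, PySem.Dict.get?_insert]
      by_cases hxa : x = a
      · simp [hxa]
      · simp [hxa, hx]

theorem pvFoldConst_nodup (cv : Int) (l : List String) (m : PySem.Dict String Int)
    (h : m.keys.Nodup) : (l.foldl (fun m node => m.insert node cv) m).keys.Nodup :=
  PySem.Dict.nodup_keys_foldl_insert l (fun _ _ => cv) m h

theorem pvFoldRev_snd :
    ∀ (rest : List String) (m : PySem.Dict String Int) (b : Int),
      (rest.reverse.foldl
        (fun (p : PySem.Dict String Int × Int) node => (p.1.insert node (p.2 + 1), p.2 + 1))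
        (m, b)).2 = b + rest.length := by
  intro rest
  induction rest with
  | nil => intro m b; simp
  | cons a t ih =>
    intro m b
    rw [List.reverse_cons, List.foldl_append, List.foldl_cons, List.foldl_nil]
    simp only [ih, List.length_cons]
    push_cast
    omega

theorem pvFoldRev_get?_notmem :
    ∀ (rest : List String) (m : PySem.Dict String Int) (b : Int) (x : String), x ∉ rest →
      (rest.reverse.foldl
        (fun (p : PySem.Dict String Int × Int) node => (p.1.insert node (p.2 + 1), p.2 + 1))
        (m, b)).1.get? x = m.get? x := by
  intro rest
  induction rest with
  | nil => intro m b x _; rfl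
  | cons a t ih =>
    intro m b x hx
    rw [List.reverse_cons, List.foldl_append, List.foldl_cons, List.foldl_nil]
    dsimp only
    rw [PySem.Dict.get?_insert, if_neg (by rintro rfl; exact hx List.mem_cons_self)]
    exact ih m b x (fun h => hx (List.mem_cons_of_mem _ h))

theorem pvFoldRev_get?_mem :
    ∀ (rest : List String) (m : PySem.Dict String Int) (b : Int)
      (Q1 : List String) (q : String) (Q2 : List String),
      rest.Nodup → rest = Q1 ++ q :: Q2 →
      (rest.reverse.foldl
        (fun (p : PySem.Dict String Int × Int) node => (p.1.insert node (p.2 + 1), p.2 + 1))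
        (m, b)).1.get? q = some (b + ((q :: Q2).length : Int)) := by
  intro rest
  induction rest with
  | nil => intro m b Q1 q Q2 _ hdec; exact absurd hdec (by simp)
  | cons a t ih =>
    intro m b Q1 q Q2 hnd hdec
    rw [List.reverse_cons, List.foldl_append, List.foldl_cons, List.foldl_nil]
    dsimp only
    cases Q1 with
    | nil =>
      simp only [List.nil_append] at hdec
      injection hdec with h1 h2
      subst h1; subst h2
      rw [PySem.Dict.get?_insert_self, pvFoldRev_snd]
      congr 1
      simp only [List.length_cons]
      push_cast
      ring
    | cons a' Q1' =>
      injection hdec with ha ht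
      have hq : q ≠ a := by
        subst ht
        rintro rfl
        exact (List.nodup_cons.mp hnd).1 (by simp)
      rw [PySem.Dict.get?_insert, if_neg hq, ih m b Q1' q Q2 (List.nodup_cons.mp hnd).2 ht]

theorem pvFoldRev_nodup :
    ∀ (rest : List String) (m : PySem.Dict String Int) (b : Int), m.keys.Nodup →
      (rest.reverse.foldl
        (fun (p : PySem.Dict String Int × Int) node => (p.1.insert node (p.2 + 1), p.2 + 1))
        (m, b)).1.keys.Nodup := by
  intro rest
  induction rest with
  | nil => intro m b h; exact h
  | cons a t ih =>
    intro m b h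
    rw [List.reverse_cons, List.foldl_append, List.foldl_cons, List.foldl_nil]
    exact PySem.Dict.nodup_keys_insert _ _ _ (ih m b h)

theorem pvIdxOf_append_singleton (cur : String) :
    ∀ (path : List String), cur ∉ path → ∀ x : String,
      List.idxOf? x (path ++ [cur]) =
        if x = cur then some path.length else List.idxOf? x path := by
  intro path
  induction path with
  | nil =>
    intro _ x
    by_cases hx : x = cur
    · simp [List.idxOf?_cons, hx]
    · have hcx : (cur == x) = false := by
        simp only [beq_eq_false_iff_ne, ne_eq]
        exact fun h => hx h.symm
      simp [List.idxOf?_cons, hcx, hx]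
  | cons a t ih =>
    intro hcur x
    rw [List.cons_append, List.idxOf?_cons, List.idxOf?_cons]
    by_cases hax : a = x
    · have hxc : ¬ x = cur := by
        rintro rfl
        exact hcur (hax ▸ List.mem_cons_self)
      simp [hax, hxc]
    · have : (a == x) = false := by simp [hax]
      rw [this]
      simp only [Bool.false_eq_true, if_false]
      rw [ih (fun h => hcur (List.mem_cons_of_mem _ h)) x]
      by_cases hx : x = cur
      · simp [hx]
      · simp [hx]

theorem pvWalkB_spec (d : PySem.Dict String String) (memo : PySem.Dict String Int) :
    ∀ (n : Nat) (cur : String) (path : List String) (pos : PySem.Dict String Int),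
      path.Nodup →
      (∀ x : String, pos.get? x = (List.idxOf? x path).map (fun i => (i : Int))) →
      ∃ Q : List String,
        (pvWalkB d memo n cur path pos).1 = path ++ Q ∧
        pvChain d cur Q (pvWalkB d memo n cur path pos).2.2 ∧
        (path ++ Q).Nodup ∧
        (∀ q ∈ Q, memo.contains q = false) ∧
        (∀ x : String, (pvWalkB d memo n cur path pos).2.1.get? x =
          (List.idxOf? x (path ++ Q)).map (fun i => (i : Int))) ∧
        ((d.contains (pvWalkB d memo n cur path pos).2.2 &&
          !(memo.contains (pvWalkB d memo n cur path pos).2.2) &&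
          !((pvWalkB d memo n cur path pos).2.1.contains (pvWalkB d memo n cur path pos).2.2)) = true →
          Q.length = n) := by
  intro n
  induction n with
  | zero =>
    intro cur path pos hnd hpos
    refine ⟨[], by simp [pvWalkB], rfl, by simpa using hnd, by simp, ?_, ?_⟩
    · simpa using hpos
    · intro _; rfl
  | succ n ih =>
    intro cur path pos hnd hpos
    by_cases hcond : (d.contains cur && !memo.contains cur && !pos.contains cur) = true
    case neg =>
      have hstep : pvWalkB d memo (n + 1) cur path pos = (path, pos, cur) := by
        rw [pvWalkB, if_neg hcond]
      refine ⟨[], by rw [hstep]; simp, by rw [hstep]; rfl, by simpa using hnd, by simp, ?_, ?_⟩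
      · intro x; rw [hstep]; simpa using hpos x
      · rw [hstep]; intro h; exact absurd h hcond
    case pos =>
      have hstep : pvWalkB d memo (n + 1) cur path pos =
          pvWalkB d memo n (d.getD cur "") (path ++ [cur]) (pos.insert cur (path.length : Int)) := by
        rw [pvWalkB, if_pos hcond]
      have hcond' := hcond
      simp only [Bool.and_eq_true, Bool.not_eq_true'] at hcond'
      obtain ⟨⟨hcd, hcm⟩, hcp⟩ := hcond'
      have hcurpath : cur ∉ path := by
        intro hmem
        have h1 : pos.contains cur = (pos.get? cur).isSome := PySem.Dict.contains_eq_isSome_get? pos cur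
        rw [hpos cur] at h1
        rw [h1] at hcp
        rcases List.idxOf?_eq_none_iff.not.mpr (by simpa using hmem) with h
        cases hio : List.idxOf? cur path with
        | none => exact h hio
        | some j => rw [hio] at hcp; simp at hcp
      have hnd' : (path ++ [cur]).Nodup := by
        rw [List.nodup_append]
        refine ⟨hnd, List.nodup_singleton _, ?_⟩
        intro a ha b hb hab
        rcases List.mem_singleton.mp hb with rfl
        exact hcurpath (hab ▸ ha)
      have hpos' : ∀ x : String, (pos.insert cur (path.length : Int)).get? x =
          (List.idxOf? x (path ++ [cur])).map (fun i => (i : Int)) := by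
        intro x
        rw [PySem.Dict.get?_insert, pvIdxOf_append_singleton cur path hcurpath x]
        by_cases hx : x = cur
        · simp [hx]
        · simp [hx, hpos x]
      obtain ⟨Q', hP, hch, hndP, hm, hPS, hstop⟩ :=
        ih (d.getD cur "") (path ++ [cur]) (pos.insert cur (path.length : Int)) hnd' hpos'
      obtain ⟨y, hy⟩ : ∃ y, d.get? cur = some y := by
        rw [PySem.Dict.contains_eq_isSome_get?] at hcd
        cases hg : d.get? cur with
        | none => rw [hg] at hcd; simp at hcd
        | some y => exact ⟨y, rfl⟩
      have hyD : d.getD cur "" = y := PySem.Dict.getD_of_get?_eq_some d "" hy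
      have hhead : ∀ c : String, pvChain d (d.getD cur "") Q' c → Q'.headD c = d.getD cur "" := by
        intro c hch'
        cases Q' with
        | nil => exact hch'.symm
        | cons a t => exact hch'.1
      refine ⟨cur :: Q', ?_, ?_, ?_, ?_, ?_, ?_⟩
      · rw [hstep, hP]; simp
      · rw [hstep]
        have hh := hhead _ hch
        refine ⟨rfl, ?_, ?_⟩
        · rw [hy, ← hyD, hh]
        · rw [hh]; exact hch
      · have : path ++ cur :: Q' = (path ++ [cur]) ++ Q' := by simp
        rw [this]
        exact hndP
      · intro q hq
        rcases List.mem_cons.mp hq with rfl | hq'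
        · exact hcm
        · exact hm q hq'
      · intro x
        rw [hstep, hPS x]
        congr 2
        simp
      · rw [hstep]
        intro h
        rw [List.length_cons, hstop h]

theorem pvStQ_nocycle (d : PySem.Dict String String) (hk : d.keys.Nodup)
    {s c : String} {Q : List String}
    (hch : pvChain d s Q c) (hnd : Q.Nodup)
    (hW : ∀ z ∈ pvWlkF d c, z ∉ Q) :
    ∀ Q1 q Q2, Q = Q1 ++ q :: Q2 → pvWlkF d q = (q :: Q2) ++ pvWlkF d c := by
  intro Q1 q Q2 hdec
  subst hdec
  have hch' : pvChain d q (q :: Q2) c := by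
    have := pvChain_append_right d Q1 (q :: Q2) s c hch
    simpa using this
  have hnd' : (q :: Q2).Nodup := (List.nodup_append.mp hnd).2.1
  exact pvEval_nocycle d hk hch' hnd'
    (fun z hz hzq => hW z hz (List.mem_append.mpr (Or.inr hzq)))

theorem pvStQ_cycle_tail (d : PySem.Dict String String) (hk : d.keys.Nodup)
    {s c : String} {Q Qt Qc : List String}
    (hch : pvChain d s Q c) (hnd : Q.Nodup) (hdec : Q = Qt ++ c :: Qc) :
    ∀ T1 q T2, Qt = T1 ++ q :: T2 → pvWlkF d q = q :: (T2 ++ c :: Qc) := by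
  intro T1 q T2 hT
  have hdec' : Q = T1 ++ q :: (T2 ++ c :: Qc) := by rw [hdec, hT]; simp
  have hch' : pvChain d q (q :: (T2 ++ c :: Qc)) c := by
    have := pvChain_append_right d T1 (q :: (T2 ++ c :: Qc)) s c (hdec' ▸ hch)
    simpa using this
  have hnd' : (q :: (T2 ++ c :: Qc)).Nodup := by
    rw [hdec'] at hnd
    exact (List.nodup_append.mp hnd).2.1
  have := pvEval_cycle_hit d hk hch' hnd'
    (by simp)
  simpa using this

theorem pvStQ_cycle_cyc (d : PySem.Dict String String) (hk : d.keys.Nodup)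
    {s c : String} {Q Qt Qc : List String}
    (hch : pvChain d s Q c) (hnd : Q.Nodup) (hdec : Q = Qt ++ c :: Qc) :
    ∀ C1 q C2, c :: Qc = C1 ++ q :: C2 → pvWlkF d q = (q :: C2) ++ C1 := by
  intro C1 q C2 hC
  have hchc : pvChain d c (c :: Qc) c := by
    have := pvChain_append_right d Qt (c :: Qc) s c (hdec ▸ hch)
    simpa using this
  cases C1 with
  | nil =>
    simp only [List.nil_append] at hC
    injection hC with h1 h2
    subst h2
    subst h1
    have hndc : (c :: Qc).Nodup := by
      rw [hdec] at hnd
      exact (List.nodup_append.mp hnd).2.1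
    have := pvEval_cycle_hit d hk hchc hndc (by simp)
    simpa using this
  | cons c' C1' =>
    have hc' : c' = c := by injection hC with h1 _; exact h1.symm
    subst hc'
    have hQc : Qc = C1' ++ q :: C2 := by injection hC
    have hndc : (c' :: Qc).Nodup := by
      rw [hdec] at hnd
      exact (List.nodup_append.mp hnd).2.1
    have hchq : pvChain d q (q :: C2) c' := by
      have hdec'' : Q = (Qt ++ c' :: C1') ++ q :: C2 := by rw [hdec, hQc]; simp
      have := pvChain_append_right d (Qt ++ c' :: C1') (q :: C2) s c' (hdec'' ▸ hch)
      simpa using this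
    have hchc1 : pvChain d c' (c' :: C1') q := by
      have h0 : pvChain d c' ((c' :: C1') ++ (q :: C2)) c' := by
        rw [hQc] at hchc
        simpa using hchc
      have := pvChain_append_left d (c' :: C1') (q :: C2) c' c' h0
      simpa using this
    have hndcomb : ((q :: C2) ++ (c' :: C1')).Nodup := by
      apply (List.perm_append_comm (l₁ := c' :: C1') (l₂ := q :: C2)).nodup
      have he : (c' :: C1') ++ (q :: C2) = c' :: Qc := by rw [hQc]; rfl
      rw [he]
      exact hndc
    exact pvEval_cycle_after d hk hchq hchc1 hndcomb

def pvInv (d : PySem.Dict String String) (memo : PySem.Dict String Int) : Prop :=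
  memo.keys.Nodup ∧
  (∀ k v, memo.get? k = some v → k ∈ d.keys ∧ v = pvSt d k) ∧
  (∀ k, memo.contains k = true → ∀ z ∈ pvWlkF d k, memo.contains z = true)

theorem pvContains_of_get? {memo : PySem.Dict String Int} {x : String} {v : Int}
    (h : memo.get? x = some v) : memo.contains x = true := by
  rw [PySem.Dict.contains_eq_isSome_get?, h]; rfl

theorem pvGet?_of_contains {memo : PySem.Dict String Int} {x : String}
    (h : memo.contains x = true) : ∃ v, memo.get? x = some v := by
  rw [PySem.Dict.contains_eq_isSome_get?] at h
  cases hg : memo.get? x with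
  | none => rw [hg] at h; simp at h
  | some v => exact ⟨v, rfl⟩

theorem pvInv_of_G (d : PySem.Dict String String)
    (memo memo' : PySem.Dict String Int) (Q : List String)
    (hQk : ∀ q ∈ Q, q ∈ d.keys) (hQm : ∀ q ∈ Q, memo.contains q = false)
    (hIn' : memo'.keys.Nodup)
    (hG1 : ∀ x, x ∉ Q → memo'.get? x = memo.get? x)
    (hG2 : ∀ q ∈ Q, memo'.get? q = some (pvSt d q))
    (hWsub : ∀ q ∈ Q, ∀ z ∈ pvWlkF d q, z ∈ Q ∨ memo.contains z = true)
    (hInv : pvInv d memo) :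
    pvInv d memo' ∧ (∀ x, memo.contains x = true → memo'.contains x = true) ∧
      (∀ q ∈ Q, memo'.contains q = true) := by
  obtain ⟨hIn, hI1, hI2⟩ := hInv
  have hmono : ∀ x, memo.contains x = true → memo'.contains x = true := by
    intro x hx
    by_cases hxQ : x ∈ Q
    · exact pvContains_of_get? (hG2 x hxQ)
    · obtain ⟨v, hv⟩ := pvGet?_of_contains hx
      exact pvContains_of_get? (by rw [hG1 x hxQ]; exact hv)
  have hQc : ∀ q ∈ Q, memo'.contains q = true := fun q hq => pvContains_of_get? (hG2 q hq)
  refine ⟨⟨hIn', ?_, ?_⟩, hmono, hQc⟩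
  · intro k v hkv
    by_cases hkQ : k ∈ Q
    · rw [hG2 k hkQ] at hkv
      injection hkv with h
      exact ⟨hQk k hkQ, h.symm⟩
    · rw [hG1 k hkQ] at hkv
      exact hI1 k v hkv
  · intro k hck z hz
    by_cases hkQ : k ∈ Q
    · rcases hWsub k hkQ z hz with h | h
      · exact hQc z h
      · exact hmono z h
    · have hck' : memo.contains k = true := by
        rw [PySem.Dict.contains_eq_isSome_get?] at hck ⊢
        rw [hG1 k hkQ] at hck
        exact hck
      exact hmono z (hI2 k hck' z hz)

theorem pvProcess_spec (d : PySem.Dict String String) (hk : d.keys.Nodup)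
    (memo : PySem.Dict String Int) (s : String) (hInv : pvInv d memo) :
    pvInv d (pvProcess d memo s) ∧
    (∀ x, memo.contains x = true → (pvProcess d memo s).contains x = true) ∧
    (s ∈ d.keys → (pvProcess d memo s).contains s = true) := by
  by_cases hs : memo.contains s = true
  · have he : pvProcess d memo s = memo := by rw [pvProcess, if_pos hs]
    rw [he]
    exact ⟨hInv, fun x h => h, fun _ => hs⟩
  · have hs' : memo.contains s = false := by simpa using hs
    obtain ⟨Q, hP, hch, hndP, hQm, hPS, hstop⟩ :=
      pvWalkB_spec d memo (d.size + 1) s [] PySem.Dict.empty (by simp)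
        (by intro x; simp)
    set w := pvWalkB d memo (d.size + 1) s [] PySem.Dict.empty with hw
    simp only [List.nil_append] at hP hndP hPS
    have hQk : ∀ q ∈ Q, q ∈ d.keys := pvChain_mem_keys d Q s w.2.2 hch
    have hQlen : Q.length ≤ d.size := pvLen_le_size d hk hndP hQk
    have hstop2 : ¬ (d.contains w.2.2 && !memo.contains w.2.2 && !w.2.1.contains w.2.2) = true := by
      intro h
      have := hstop h
      omega
    have hcont : ∀ x, w.2.1.contains x = (List.idxOf? x Q).isSome := by
      intro x
      rw [PySem.Dict.contains_eq_isSome_get?, hPS x]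
      cases List.idxOf? x Q <;> rfl
    by_cases hcyc : w.2.1.contains w.2.2 = true
    case pos =>
      have hrun : pvProcess d memo s =
          ((PySem.List.slice w.1 none (some (w.2.1.getD w.2.2 0))).reverse.foldl
            (fun (p : PySem.Dict String Int × Int) node => (p.1.insert node (p.2 + 1), p.2 + 1))
            ((PySem.List.slice w.1 (some (w.2.1.getD w.2.2 0)) none).foldl
              (fun m node => m.insert node ((w.1.length : Int) - w.2.1.getD w.2.2 0)) memo,
             (w.1.length : Int) - w.2.1.getD w.2.2 0)).1 := by
        rw [pvProcess, if_neg hs, ← hw]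
        dsimp only
        rw [if_pos hcyc]
      obtain ⟨jn, hio⟩ : ∃ jn, List.idxOf? w.2.2 Q = some jn := by
        rw [hcont w.2.2] at hcyc
        cases hio : List.idxOf? w.2.2 Q with
        | none => rw [hio] at hcyc; simp at hcyc
        | some j => exact ⟨j, rfl⟩
      obtain ⟨hjn, hQjn, -⟩ := List.idxOf?_eq_some_iff.mp hio
      have hgetD : w.2.1.getD w.2.2 0 = (jn : Int) := by
        rw [PySem.Dict.getD_eq_get?_getD, hPS w.2.2, hio]; rfl
      have hlenw : (w.1.length : Int) = (Q.length : Int) := by rw [hP]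
      have htklen : (Q.take jn).length = jn := by
        rw [List.length_take]; omega
      have hdecQ : Q = Q.take jn ++ w.2.2 :: Q.drop (jn + 1) := by
        conv_lhs => rw [← List.take_append_drop jn Q]
        rw [List.drop_eq_getElem_cons hjn, hQjn]
      have hmemo' : pvProcess d memo s =
          ((Q.take jn).reverse.foldl
            (fun (p : PySem.Dict String Int × Int) node => (p.1.insert node (p.2 + 1), p.2 + 1))
            ((Q.drop jn).foldl
              (fun m node => m.insert node ((Q.length : Int) - (jn : Int))) memo,
             (Q.length : Int) - (jn : Int))).1 := by
        rw [hrun, hgetD, hlenw, hP, PySem.List.slice_from_natCast, PySem.List.slice_to_natCast]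
      rw [hmemo']
      set cv : Int := (Q.length : Int) - (jn : Int) with hcv
      set memoC := (Q.drop jn).foldl (fun m node => m.insert node cv) memo with hmemoC
      set memoF := ((Q.take jn).reverse.foldl
        (fun (p : PySem.Dict String Int × Int) node => (p.1.insert node (p.2 + 1), p.2 + 1))
        (memoC, cv)).1 with hmemoF
      have hndTake : (Q.take jn).Nodup := (List.take_sublist jn Q).nodup hndP
      have hIn' : memoF.keys.Nodup := by
        rw [hmemoF]
        exact pvFoldRev_nodup _ _ _ (pvFoldConst_nodup _ _ _ hInv.1)
      have hG1 : ∀ x, x ∉ Q → memoF.get? x = memo.get? x := by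
        intro x hx
        rw [hmemoF, pvFoldRev_get?_notmem _ _ _ x
          (fun h => hx (List.mem_of_mem_take h)), hmemoC, pvFoldConst_get?,
          if_neg (fun h => hx (List.mem_of_mem_drop h))]
      have hval : ∀ q ∈ Q, memoF.get? q = some (pvSt d q) ∧ (∀ z ∈ pvWlkF d q, z ∈ Q) := by
        intro q hq
        by_cases hqt : q ∈ Q.take jn
        · obtain ⟨T1, T2, hT⟩ := List.append_of_mem hqt
          have hwlk : pvWlkF d q = q :: (T2 ++ w.2.2 :: Q.drop (jn + 1)) :=
            pvStQ_cycle_tail d hk hch hndP hdecQ T1 q T2 hT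
          constructor
          · rw [hmemoF, pvFoldRev_get?_mem (Q.take jn) memoC cv T1 q T2 hndTake hT]
            congr 1
            rw [pvSt, hwlk, hcv]
            have h1 : jn = T1.length + (T2.length + 1) := by
              have htk := htklen
              rw [hT] at htk
              simp only [List.length_append, List.length_cons] at htk
              omega
            have h2 : Q.length = jn + (1 + (Q.drop (jn + 1)).length) := by
              conv_lhs => rw [hdecQ]
              simp only [List.length_append, List.length_cons, htklen]
              omega
            simp only [List.length_cons, List.length_append]
            push_cast
            omega
          · intro z hz
            rw [hwlk] at hz
            rcases List.mem_cons.mp hz with rfl | hz'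
            · exact hq
            · rcases List.mem_append.mp hz' with h | h
              · rw [hdecQ, hT]
                simp only [List.mem_append, List.mem_cons]
                tauto
              · rw [hdecQ]
                exact List.mem_append_right _ h
        · have hqd : q ∈ w.2.2 :: Q.drop (jn + 1) := by
            rcases List.mem_append.mp (hdecQ ▸ hq) with h | h
            · exact absurd h hqt
            · exact h
          obtain ⟨C1, C2, hC⟩ := List.append_of_mem hqd
          have hwlk : pvWlkF d q = (q :: C2) ++ C1 :=
            pvStQ_cycle_cyc d hk hch hndP hdecQ C1 q C2 hC
          constructor
          · rw [hmemoF, pvFoldRev_get?_notmem _ _ _ q hqt, hmemoC, pvFoldConst_get?,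
              if_pos (by rw [List.drop_eq_getElem_cons hjn, hQjn]; exact hC ▸ hqd)]
            congr 1
            rw [pvSt, hwlk, hcv]
            have h1 : Q.length = jn + (C1.length + (C2.length + 1)) := by
              conv_lhs => rw [hdecQ]
              have hc2 : (w.2.2 :: Q.drop (jn + 1)).length = C1.length + (C2.length + 1) := by
                rw [hC]
                simp only [List.length_append, List.length_cons]
                try omega
              simp only [List.length_append, htklen, hc2]
            simp only [List.length_append, List.length_cons]
            push_cast
            omega
          · intro z hz
            rw [hwlk] at hz
            have hzC : z ∈ w.2.2 :: Q.drop (jn + 1) := by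
              rw [hC]
              rcases List.mem_append.mp hz with h | h
              · rcases List.mem_cons.mp h with rfl | h'
                · exact List.mem_append_right _ List.mem_cons_self
                · exact List.mem_append_right _ (List.mem_cons_of_mem _ h')
              · exact List.mem_append_left _ h
            rw [hdecQ]
            exact List.mem_append_right _ hzC
      obtain ⟨hInv', hmono, hQc⟩ := pvInv_of_G d memo memoF Q hQk hQm hIn'
        hG1 (fun q hq => (hval q hq).1)
        (fun q hq z hz => Or.inl ((hval q hq).2 z hz)) hInv
      refine ⟨hInv', hmono, ?_⟩
      intro hsk
      have hQne : Q ≠ [] := by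
        intro h
        rw [h] at hjn
        simp at hjn
      cases hQh : Q with
      | nil => exact absurd hQh hQne
      | cons q0 Q0 =>
        have hq0 : q0 = s := by
          rw [hQh] at hch
          exact hch.1
        exact hQc s (by rw [← hq0]; exact hQh ▸ List.mem_cons_self)
    case neg =>
      have hcyc' : w.2.1.contains w.2.2 = false := by simpa using hcyc
      have hcQ : w.2.2 ∉ Q := by
        intro h
        rw [hcont] at hcyc'
        cases hio : List.idxOf? w.2.2 Q with
        | none => exact (List.idxOf?_eq_none_iff.mp hio) h
        | some j => rw [hio] at hcyc'; simp at hcyc'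
      have hrun : pvProcess d memo s =
          (Q.reverse.foldl
            (fun (p : PySem.Dict String Int × Int) node => (p.1.insert node (p.2 + 1), p.2 + 1))
            (memo, memo.getD w.2.2 0)).1 := by
        rw [pvProcess, if_neg hs, ← hw]
        dsimp only
        rw [if_neg hcyc, hP]
      rw [hrun]
      set memoF := (Q.reverse.foldl
        (fun (p : PySem.Dict String Int × Int) node => (p.1.insert node (p.2 + 1), p.2 + 1))
        (memo, memo.getD w.2.2 0)).1 with hmemoF
      have hCc : d.contains w.2.2 = false ∨ memo.contains w.2.2 = true := by
        by_contra hcon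
        push_neg at hcon
        obtain ⟨h1, h2⟩ := hcon
        apply hstop2
        have h1' : d.contains w.2.2 = true := by
          cases hb : d.contains w.2.2
          · exact absurd hb h1
          · rfl
        have h2' : memo.contains w.2.2 = false := by
          cases hb : memo.contains w.2.2
          · rfl
          · exact absurd hb h2
        rw [h1', h2', hcyc']
        rfl
      have hfacts : memo.getD w.2.2 0 = pvSt d w.2.2 ∧
          (∀ z ∈ pvWlkF d w.2.2, z ∉ Q) ∧
          (∀ z ∈ pvWlkF d w.2.2, memo.contains z = true) := by
        rcases hCc with hno | hyes
        · have hget : d.get? w.2.2 = none := by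
            rw [PySem.Dict.contains_eq_isSome_get?] at hno
            cases hg : d.get? w.2.2 with
            | none => rfl
            | some y => rw [hg] at hno; simp at hno
          have hwnil : pvWlkF d w.2.2 = [] := pvWlk_stop d _ _ _ (Or.inl hget)
          have hmc : memo.contains w.2.2 = false := by
            cases hb : memo.contains w.2.2
            · rfl
            · obtain ⟨v, hv⟩ := pvGet?_of_contains hb
              have := (hInv.2.1 _ _ hv).1
              rw [← PySem.Dict.contains_iff_mem_keys] at this
              rw [this] at hno
              simp at hno
          refine ⟨?_, ?_, ?_⟩
          · have hgn : memo.get? w.2.2 = none := by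
              rw [PySem.Dict.contains_eq_isSome_get?] at hmc
              cases hg : memo.get? w.2.2 with
              | none => rfl
              | some v => rw [hg] at hmc; simp at hmc
            rw [PySem.Dict.getD_eq_get?_getD, hgn, pvSt, hwnil]
            rfl
          · rw [hwnil]; intro z hz; cases hz
          · rw [hwnil]; intro z hz; cases hz
        · obtain ⟨v, hv⟩ := pvGet?_of_contains hyes
          have hveq : v = pvSt d w.2.2 := (hInv.2.1 _ _ hv).2
          have hWcont : ∀ z ∈ pvWlkF d w.2.2, memo.contains z = true :=
            hInv.2.2 _ hyes
          refine ⟨?_, ?_, hWcont⟩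
          · rw [PySem.Dict.getD_eq_get?_getD, hv, hveq]
            rfl
          · intro z hz hzQ
            have := hWcont z hz
            rw [hQm z hzQ] at this
            simp at this
        
      obtain ⟨hbase, hWc, hWcont⟩ := hfacts
      have hIn' : memoF.keys.Nodup := by
        rw [hmemoF]
        exact pvFoldRev_nodup _ _ _ hInv.1
      have hG1 : ∀ x, x ∉ Q → memoF.get? x = memo.get? x := by
        intro x hx
        rw [hmemoF, pvFoldRev_get?_notmem _ _ _ x hx]
      have hval : ∀ q ∈ Q, memoF.get? q = some (pvSt d q) ∧
          (∀ z ∈ pvWlkF d q, z ∈ Q ∨ memo.contains z = true) := by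
        intro q hq
        obtain ⟨Q1, Q2, hdec⟩ := List.append_of_mem hq
        have hwlk : pvWlkF d q = (q :: Q2) ++ pvWlkF d w.2.2 :=
          pvStQ_nocycle d hk hch hndP hWc Q1 q Q2 hdec
        constructor
        · rw [hmemoF, pvFoldRev_get?_mem Q memo _ Q1 q Q2 hndP hdec]
          congr 1
          rw [pvSt, hwlk, hbase, pvSt]
          simp only [List.length_append, List.length_cons]
          push_cast
          ring
        · intro z hz
          rw [hwlk] at hz
          rcases List.mem_append.mp hz with h | h
          · left
            rcases List.mem_cons.mp h with rfl | h'
            · exact hq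
            · rw [hdec]
              exact List.mem_append_right _ (List.mem_cons_of_mem _ h')
          · right
            exact hWcont z h
      obtain ⟨hInv', hmono, hQc⟩ := pvInv_of_G d memo memoF Q hQk hQm hIn'
        hG1 (fun q hq => (hval q hq).1) (fun q hq => (hval q hq).2) hInv
      refine ⟨hInv', hmono, ?_⟩
      intro hsk
      have hQne : Q ≠ [] := by
        intro h
        apply hstop2
        have hcs : w.2.2 = s := by
          rw [h] at hch
          exact hch.symm
        rw [hcs]
        rw [(PySem.Dict.contains_iff_mem_keys d s).mpr hsk, hs']
        have : w.2.1.contains s = false := by rw [← hcs]; exact hcyc'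
        rw [this]
        rfl
      cases hQh : Q with
      | nil => exact absurd hQh hQne
      | cons q0 Q0 =>
        have hq0 : q0 = s := by
          rw [hQh] at hch
          exact hch.1
        exact hQc s (by rw [← hq0]; exact hQh ▸ List.mem_cons_self)


theorem pvInv_empty (d : PySem.Dict String String) : pvInv d PySem.Dict.empty := by
  refine ⟨PySem.Dict.nodup_keys_empty, ?_, ?_⟩
  · intro k v h
    rw [PySem.Dict.get?_empty] at h
    cases h
  · intro k h
    rw [PySem.Dict.contains_empty] at h
    cases h

theorem pvFold_inv (d : PySem.Dict String String) (hk : d.keys.Nodup) :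
    ∀ (l : List (String × String)) (memo : PySem.Dict String Int), pvInv d memo →
      pvInv d (l.foldl (fun m kv => pvProcess d m kv.1) memo) ∧
      (∀ x, memo.contains x = true →
        (l.foldl (fun m kv => pvProcess d m kv.1) memo).contains x = true) ∧
      (∀ kv ∈ l, kv.1 ∈ d.keys →
        (l.foldl (fun m kv => pvProcess d m kv.1) memo).contains kv.1 = true) := by
  intro l
  induction l with
  | nil => intro memo h; exact ⟨h, fun x hx => hx, by simp⟩
  | cons a t ih =>
    intro memo h
    obtain ⟨h1, hmono1, hself⟩ := pvProcess_spec d hk memo a.1 h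
    obtain ⟨hIl, hmono2, hall⟩ := ih (pvProcess d memo a.1) h1
    rw [List.foldl_cons]
    refine ⟨hIl, ?_, ?_⟩
    · intro x hx
      exact hmono2 x (hmono1 x hx)
    · intro kv hkv hk1
      rcases List.mem_cons.mp hkv with rfl | hkv'
      · exact hmono2 kv.1 (hself hk1)
      · exact hall kv hkv' hk1

theorem pvSt_pos (d : PySem.Dict String String) (k : String) (hkk : k ∈ d.keys) :
    1 ≤ pvSt d k := by
  have hc : d.contains k = true := (PySem.Dict.contains_iff_mem_keys d k).mpr hkk
  rw [PySem.Dict.contains_eq_isSome_get?] at hc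
  obtain ⟨y, hy⟩ : ∃ y, d.get? k = some y := by
    cases hg : d.get? k with
    | none => rw [hg] at hc; simp at hc
    | some y => exact ⟨y, rfl⟩
  rw [pvSt, pvWlkF, pvWlk_succ, hy]
  dsimp only
  rw [if_neg (List.not_mem_nil)]
  simp only [List.length_cons]
  push_cast
  omega

theorem pvFoldMax (g : (String × String) → Int) :
    ∀ (l : List (String × String)) (a : Int),
      l.foldl (fun m kv => max m (1 + g kv)) (1 + a) =
        1 + l.foldl (fun m kv => max m (g kv)) a := by
  intro l
  induction l with
  | nil => intro a; rfl
  | cons kv t ih =>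
    intro a
    rw [List.foldl_cons, List.foldl_cons, max_add_add_left, ih]

theorem pv_main : ∀ (deps : List (String × String)) (roots : List String),
    calc_tree_depth_py deps roots = calc_tree_depth_py_alt deps roots := by
  intro deps roots
  unfold calc_tree_depth_py calc_tree_depth_py_alt
  dsimp only
  set d := PySem.Dict.ofList deps with hd
  have hk : d.keys.Nodup := PySem.Dict.nodup_keys_ofList deps
  by_cases hemp : d.items.isEmpty
  · rw [if_pos hemp, if_pos hemp]
  · rw [if_neg hemp, if_neg hemp]
    set memoF := d.items.foldl (fun m kv => pvProcess d m kv.1) PySem.Dict.empty with hmemoF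
    obtain ⟨⟨hIn, hI1, hI2⟩, -, hall⟩ :=
      pvFold_inv d hk d.items PySem.Dict.empty (pvInv_empty d)
    have hgetD : ∀ kv ∈ d.items, memoF.getD kv.1 0 = pvSt d kv.1 := by
      intro kv hkv
      have hkk : kv.1 ∈ d.keys := PySem.Dict.mem_keys_of_mem_items d hkv
      obtain ⟨v, hv⟩ := pvGet?_of_contains (hall kv hkv hkk)
      rw [PySem.Dict.getD_eq_get?_getD, hv]
      exact (hI1 _ _ hv).2
    have hA1 : ∀ kv : String × String,
        pvWalkA d (d.size + 1) kv.1 PySem.Set.empty 1 = 1 + pvSt d kv.1 := by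
      intro kv
      rw [pvWalkA_eq, pvSt, pvWlkF,
        pvWlk_congr d (d.size + 1) kv.1 PySem.Set.empty []
          (by intro z; simp [PySem.Set.empty])]
    have hAside : d.items.foldl
        (fun max_depth nd => max max_depth (pvWalkA d (d.size + 1) nd.1 PySem.Set.empty 1)) 1 =
        d.items.foldl (fun m kv => max m (1 + pvSt d kv.1)) 1 := by
      apply PySem.List.foldl_congr_mem
      intro m kv _
      rw [hA1]
    rw [hAside]
    cases hitems : d.items with
    | nil => rw [hitems] at hemp; simp at hemp
    | cons kv0 rest =>
      have hkv0 : kv0 ∈ d.items := by rw [hitems]; exact List.mem_cons_self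
      have hg0 : memoF.getD kv0.1 0 = pvSt d kv0.1 := hgetD kv0 hkv0
      have hpos0 : 1 ≤ pvSt d kv0.1 :=
        pvSt_pos d kv0.1 (PySem.Dict.mem_keys_of_mem_items d hkv0)
      rw [List.map_cons]
      dsimp only
      rw [List.foldl_cons]
      have hmax : max 1 (1 + pvSt d kv0.1) = 1 + pvSt d kv0.1 := by omega
      rw [hmax, pvFoldMax (fun kv => pvSt d kv.1) rest (pvSt d kv0.1)]
      congr 1
      rw [hg0, List.foldl_map]
      apply PySem.List.foldl_congr_mem
      intro m kv hkv
      rw [hgetD kv (by rw [hitems]; exact List.mem_cons_of_mem _ hkv)]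

-- ===== VERDICT (by name: the statement is the Claim_ definition above) =====
theorem calc_tree_depth_py_spec : Claim_equal_calc_tree_depth_py := by
  intro deps roots _
  unfold Spec_calc_tree_depth_py
  exact pv_main deps roots
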